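-- pv_equiv track=rewrite | github.com/j-archit/Digital-Filter | wrapper.py | nbit_bin
-- ===== SOURCE A (Python) =====
-- params = {
--     # Model Params
--     "ftype"     : "low",
--     "fs"        : 48000,
--     "fc"        : 10000,
--     "order"     : 4,
--     "bitwidth"  : 32,
--     "fac"       : 20,
--     "gainl"     : 0,
--     "gainm"     : 0,
--     "htp"       : 10,
--     # Plot Params
--     "infile"    : "out.txt",
--     "color1"    : '#444444',
--     "color2"    : '#4444AA',
--     "color3"    : '#44AA44',
--     "color4"    : '#AA6666',
--     "DPI"       : 300,
--     "l_loc"     : "lower left",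
--     "l_fancy"   : True,
--     "l_box"     : (-0.02, -0.25),
--     "l_alpha"   : 0,
--     "transp"    : False,
--     "t_box"     : (1, 0),
--     "t_hor"     : "right",
--     "t_ver"     : "center_baseline"
-- }
--
-- def nbit_bin (a, n = 2*params["bitwidth"]):
--     """Generate a n-bit binary representation of the input a
--
--     Args:
--         a (int): input integer
--         n (int, optional): number of bits in representation. Defaults to 2*params["bitwidth"].
--
--     Returns:
--         str: n bit binary representation of the number a
--     """
--     binary = bin(a)
--     for k, bit in enumerate(binary):
--         if bit == 'b':
--             binary = binary[k+1:]
--             break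
--     if(len(binary) < n):
--            binary = f"{(a<0)*1}"*(n - len(binary)) + binary
--     return binary
-- ===== SOURCE B (Python) =====
-- params = {"bitwidth": 32}
--
-- def nbit_bin(a, n=2 * params["bitwidth"]):
--     """n-bit binary representation of a: magnitude bits, sign-fill padding."""
--     m = abs(a)
--     digits = []
--     while m > 0:
--         digits.append('1' if m & 1 else '0')
--         m >>= 1
--     s = ''.join(reversed(digits)) if digits else '0'
--     if len(s) < n:
--         s = ('1' if a < 0 else '0') * (n - len(s)) + s
--     return s
-- ===== Notes on version B (the rewrite author's own statement) =====
-- stated objective: alternative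
-- what changed: Replaces bin()+enumerate-scan-for-'b'+slice with an explicit bit-extraction loop (repeated halving, LSB-first digit list, reversed and joined), keeping the same sign-fill padding.
import Mathlib
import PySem

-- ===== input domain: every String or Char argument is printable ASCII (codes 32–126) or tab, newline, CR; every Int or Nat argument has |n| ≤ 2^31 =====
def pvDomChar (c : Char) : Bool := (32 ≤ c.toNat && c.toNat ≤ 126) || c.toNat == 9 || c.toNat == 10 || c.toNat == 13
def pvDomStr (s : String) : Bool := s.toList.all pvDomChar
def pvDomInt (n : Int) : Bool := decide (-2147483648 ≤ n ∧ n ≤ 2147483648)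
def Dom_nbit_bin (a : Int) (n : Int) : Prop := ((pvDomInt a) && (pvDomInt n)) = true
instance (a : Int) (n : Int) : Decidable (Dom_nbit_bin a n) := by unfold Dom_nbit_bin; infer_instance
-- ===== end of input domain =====

-- B replaces bin()+scan-for-'b'+slice by an explicit bit-extraction loop (alternative decomposition, same cost).

-- ===== PORT A =====
-- the 'for k, bit in enumerate(binary): if bit == 'b': binary = binary[k+1:]; break' loop
def nbitStrip : List (Int × Char) → List Char → List Char
  | [], binary => binary
  | (k, bit) :: rest, binary =>
      if bit = 'b' then PySem.List.slice binary (some (k + 1)) none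
      else nbitStrip rest binary

def nbit_bin (a : Int) (n : Int) : String :=
  let binary := PySem.Int.toBinChars0b a                     -- bin(a)
  let binary := nbitStrip (PySem.List.enumerate binary 0) binary
  let binary :=
    if PySem.List.len binary < n then
      PySem.List.pyRepeat (PySem.Int.toChars ((if a < 0 then 1 else 0) * 1)) (n - PySem.List.len binary)
        ++ binary                                            -- f"{(a<0)*1}"*(n-len) + binary
    else binary
  String.ofList binary

-- ===== PORT B =====
-- the while loop: LSB-first digit list of m = abs(a)
def nbitBitsRev (m : Nat) : List Char :=
  if m = 0 then [] else (if m % 2 = 1 then '1' else '0') :: nbitBitsRev (m / 2)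

def nbit_bin_alt (a : Int) (n : Int) : String :=
  let digits := nbitBitsRev a.natAbs
  let s := if digits = [] then ['0'] else digits.reverse     -- ''.join(reversed(digits)) or '0'
  let s :=
    if (s.length : Int) < n then
      List.replicate (n - (s.length : Int)).toNat (if a < 0 then '1' else '0') ++ s
    else s
  String.ofList s

-- ===== PRECONDITION & SPEC =====
def Spec_nbit_bin (a : Int) (n : Int) (out : String) : Prop := out = nbit_bin_alt a n
instance (a : Int) (n : Int) (out : String) : Decidable (Spec_nbit_bin a n out) := by unfold Spec_nbit_bin; infer_instance

-- ===== CLAIM (what is proved, stated in full; the proofs are below) =====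
def Claim_equal_nbit_bin : Prop := ∀ (a : Int) (n : Int), Dom_nbit_bin a n → Spec_nbit_bin a n (nbit_bin a n)

-- ===== LEMMAS AND PROOFS =====

-- Nat.toDigits 2 (what bin() prints after the prefix) is B's reversed bit list
theorem nbit_toDigitsCore_eq (fuel : Nat) : ∀ (m : Nat) (ds : List Char), m < fuel →
    Nat.toDigitsCore 2 fuel m ds
      = (if m = 0 then ['0'] else (nbitBitsRev m).reverse) ++ ds := by
  induction fuel with
  | zero => intro m ds h; omega
  | succ fuel ih =>
    intro m ds h
    rw [Nat.toDigitsCore]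
    by_cases h2 : m / 2 = 0
    · have hm : m = 0 ∨ m = 1 := by omega
      simp only [h2]
      rcases hm with rfl | rfl <;> simp [nbitBitsRev, Nat.digitChar]
    · have hm : m ≠ 0 := by omega
      simp only [if_neg h2]
      rw [ih (m / 2) _ (by omega)]
      have hb : (nbitBitsRev m).reverse = (nbitBitsRev (m / 2)).reverse ++ [Nat.digitChar (m % 2)] := by
        rw [nbitBitsRev, if_neg hm]
        rcases Nat.mod_two_eq_zero_or_one m with h1 | h1 <;> simp [h1, Nat.digitChar]
      rw [if_neg h2, if_neg hm, hb]
      simp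

theorem nbit_toDigits_eq (m : Nat) :
    Nat.toDigits 2 m = if m = 0 then ['0'] else (nbitBitsRev m).reverse := by
  have := nbit_toDigitsCore_eq (m + 1) m [] (by omega)
  simpa [Nat.toDigits] using this

-- stripping bin(a)'s prefix leaves exactly the magnitude digits
theorem nbit_strip_eq (a : Int) :
    nbitStrip (PySem.List.enumerate (PySem.Int.toBinChars0b a) 0) (PySem.Int.toBinChars0b a)
      = Nat.toDigits 2 a.natAbs := by
  by_cases ha : a < 0
  · have hn : a.toNat = 0 := by omega
    simp only [PySem.Int.toBinChars0b, if_pos ha]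
    rw [PySem.List.enumerate_cons, PySem.List.enumerate_cons, PySem.List.enumerate_cons]
    simp only [nbitStrip]
    rw [if_neg (by decide), if_neg (by decide), if_pos (by decide)]
    rw [show ((0:Int) + 1 + 1 + 1) = (3:Int) by norm_num,
        PySem.List.slice_from _ (show (0:Int) ≤ 3 by norm_num)]
    rfl
  · have hn : a.natAbs = a.toNat := by omega
    simp only [PySem.Int.toBinChars0b, if_neg ha]
    rw [PySem.List.enumerate_cons, PySem.List.enumerate_cons]
    simp only [nbitStrip]
    rw [if_neg (by decide), if_pos (by decide)]
    rw [show ((0:Int) + 1 + 1) = (2:Int) by norm_num,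
        PySem.List.slice_from _ (show (0:Int) ≤ 2 by norm_num)]
    rw [hn]; rfl

-- ===== VERDICT (by name: the statement is the Claim_ definition above) =====
theorem nbit_bin_spec : Claim_equal_nbit_bin := by
  intro a n _
  show nbit_bin a n = nbit_bin_alt a n
  simp only [nbit_bin, nbit_bin_alt]
  rw [nbit_strip_eq, nbit_toDigits_eq]
  have hrev : (nbitBitsRev a.natAbs = []) ↔ a.natAbs = 0 := by
    constructor
    · intro h; by_contra hm; rw [nbitBitsRev, if_neg hm] at h; exact List.cons_ne_nil _ _ h
    · intro h; simp [h, nbitBitsRev]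
  have hfill : PySem.Int.toChars (if a < 0 then (1:Int) else 0) = [if a < 0 then '1' else '0'] := by
    by_cases ha : a < 0 <;> simp [ha] <;> rfl
  simp [hrev, hfill, PySem.List.pyRepeat_singleton, PySem.List.len]
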